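-- pv_equiv track=rewrite | github.com/MaybebabyEnjoyer/ITMO | course2/sem4/discrete-math/Lab-Gen-Functions/I.py | multiply_and_reduce_polynomials
-- ===== SOURCE A (Python) =====
-- MOD = 104857601
--
-- def multiply_and_reduce_polynomials(polynomial_q, degree_k):
-- 	negative_q = [normalize_mod(polynomial_q[i] if i % 2 == 0 else -polynomial_q[i]) for i in range(len(polynomial_q))]
-- 	coefficients_r = [0] * (degree_k + 1)
-- 	for i in range(0, 2 * degree_k + 1, 2):
-- 		coefficient_r = 0
-- 		for j in range(0, i + 1):
-- 			qq = polynomial_q[j] if j <= degree_k else 0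
-- 			neq = negative_q[i - j] if i - j <= degree_k else 0
-- 			coefficient_r = normalize_mod(coefficient_r + qq * neq)
-- 		coefficients_r[i // 2] = coefficient_r
-- 	return coefficients_r
--
-- def normalize_mod(value):
-- 	return ((value % MOD) + MOD) % MOD
-- ===== SOURCE B (Python) =====
-- MOD = 104857601
--
-- def multiply_and_reduce_polynomials(polynomial_q, degree_k):
--     # Q(x)*Q(-x) via even/odd split: result[m] = (E*E)[m] - (O*O)[m-1],
--     # where E/O are the even/odd-indexed coefficients of Q truncated to degree k.
--     t = polynomial_q[:degree_k + 1] if degree_k >= 0 else []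
--     n_even = (len(t) + 1) // 2
--     n_odd = len(t) // 2
--     result = []
--     for m in range(degree_k + 1):
--         total = 0
--         for a in range(max(0, m - n_even + 1), min(m + 1, n_even)):
--             total += t[2 * a] * t[2 * (m - a)]
--         for a in range(max(0, m - n_odd), min(m, n_odd)):
--             total -= t[2 * a + 1] * t[2 * (m - 1 - a) + 1]
--         result.append(total % MOD)
--     return result
-- ===== Notes on version B (the rewrite author's own statement) =====
-- stated objective: alternative
-- what changed: B truncates Q to degree k once and computes each even coefficient of Q(x)*Q(-x) via the even/odd split (E*E)[m] - (O*O)[m-1] over tight index windows with a single mod per coefficient, instead of A's length-(2m+1) signed convolution with a normalize_mod call per term; intended as a constant-factor speedup (measured ~3x at n<=16384, unconfirmed at the largest probe size).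
import Mathlib
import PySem

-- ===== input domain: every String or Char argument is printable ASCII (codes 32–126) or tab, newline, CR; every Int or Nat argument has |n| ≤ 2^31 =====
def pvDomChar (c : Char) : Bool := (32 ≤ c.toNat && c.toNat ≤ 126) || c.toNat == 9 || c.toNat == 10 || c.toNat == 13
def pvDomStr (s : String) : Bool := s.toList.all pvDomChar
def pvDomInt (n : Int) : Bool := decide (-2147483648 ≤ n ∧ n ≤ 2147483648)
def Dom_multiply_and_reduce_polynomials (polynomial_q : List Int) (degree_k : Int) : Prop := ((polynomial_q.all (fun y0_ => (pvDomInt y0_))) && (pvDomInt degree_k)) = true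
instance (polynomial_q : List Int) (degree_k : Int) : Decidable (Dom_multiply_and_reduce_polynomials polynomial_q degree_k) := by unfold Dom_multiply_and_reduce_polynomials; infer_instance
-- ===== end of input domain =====

-- B replaces A's single length-(2k+1) signed convolution per coefficient by an even/odd
-- split (result[m] = (E*E)[m] - (O*O)[m-1]) with tight index windows and one mod per
-- coefficient instead of one normalize_mod call per term (intended as a constant-factor
-- speedup; a timing run read ~3x at n <= 16384 but could not confirm it at the largest size).

-- ===== PORT A =====
def pvMOD : Int := 104857601

def normalize_mod (value : Int) : Int :=
  PySem.Int.mod (PySem.Int.mod value pvMOD + pvMOD) pvMOD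

def multiply_and_reduce_polynomials (polynomial_q : List Int) (degree_k : Int) : List Int :=
  let negative_q : List Int :=
    (PySem.List.pyRange 0 (polynomial_q.length : Int) 1).map (fun i =>
      normalize_mod (if PySem.Int.mod i 2 = 0 then PySem.List.pyGetD polynomial_q i 0
                     else -(PySem.List.pyGetD polynomial_q i 0)))
  let coefficients_r : List Int := List.replicate (degree_k + 1).toNat 0
  (PySem.List.pyRange 0 (2 * degree_k + 1) 2).foldl (fun r i =>
    let coefficient_r :=
      (PySem.List.pyRange 0 (i + 1) 1).foldl (fun acc j =>
        let qq := if j ≤ degree_k then PySem.List.pyGetD polynomial_q j 0 else 0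
        let neq := if i - j ≤ degree_k then PySem.List.pyGetD negative_q (i - j) 0 else 0
        normalize_mod (acc + qq * neq)) 0
    PySem.List.pySetD r (PySem.Int.floordiv i 2) coefficient_r) coefficients_r

-- ===== PORT B =====
def multiply_and_reduce_polynomials_alt (polynomial_q : List Int) (degree_k : Int) : List Int :=
  let t : List Int :=
    if 0 ≤ degree_k then PySem.List.slice polynomial_q none (some (degree_k + 1)) else []
  let n_even : Int := PySem.Int.floordiv ((t.length : Int) + 1) 2
  let n_odd : Int := PySem.Int.floordiv (t.length : Int) 2
  (PySem.List.pyRange 0 (degree_k + 1) 1).foldl (fun result m =>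
    let t1 := (PySem.List.pyRange (max 0 (m - n_even + 1)) (min (m + 1) n_even) 1).foldl
      (fun total a =>
        total + PySem.List.pyGetD t (2 * a) 0 * PySem.List.pyGetD t (2 * (m - a)) 0) 0
    let t2 := (PySem.List.pyRange (max 0 (m - n_odd)) (min m n_odd) 1).foldl
      (fun total a =>
        total - PySem.List.pyGetD t (2 * a + 1) 0 * PySem.List.pyGetD t (2 * (m - 1 - a) + 1) 0) t1
    result ++ [PySem.Int.mod t2 pvMOD]) []

-- ===== PRECONDITION & SPEC =====
-- A indexes polynomial_q at every j ≤ degree_k, so it raises IndexError whenever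
-- 0 ≤ degree_k and the list is shorter than degree_k + 1; Pre_ excludes exactly those inputs.
def Pre_multiply_and_reduce_polynomials (polynomial_q : List Int) (degree_k : Int) : Prop :=
  degree_k < 0 ∨ degree_k + 1 ≤ (polynomial_q.length : Int)
instance (polynomial_q : List Int) (degree_k : Int) : Decidable (Pre_multiply_and_reduce_polynomials polynomial_q degree_k) := by unfold Pre_multiply_and_reduce_polynomials; infer_instance

def pvWitness_multiply_and_reduce_polynomials : List Int × Int := ([3, -1, 4], 1)

def Spec_multiply_and_reduce_polynomials (polynomial_q : List Int) (degree_k : Int) (out : List Int) : Prop := out = multiply_and_reduce_polynomials_alt polynomial_q degree_k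
instance (polynomial_q : List Int) (degree_k : Int) (out : List Int) : Decidable (Spec_multiply_and_reduce_polynomials polynomial_q degree_k out) := by unfold Spec_multiply_and_reduce_polynomials; infer_instance

-- ===== CLAIM (what is proved, stated in full; the proofs are below) =====
def Claim_equal_multiply_and_reduce_polynomials : Prop := ∀ (polynomial_q : List Int) (degree_k : Int), Dom_multiply_and_reduce_polynomials polynomial_q degree_k → Pre_multiply_and_reduce_polynomials polynomial_q degree_k → Spec_multiply_and_reduce_polynomials polynomial_q degree_k (multiply_and_reduce_polynomials polynomial_q degree_k)


-- ===== LEMMAS AND PROOFS =====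
-- ===== LEMMAS AND PROOFS =====
def sumN (n : Nat) (g : Nat → Int) : Int := ((List.range n).map g).sum

theorem sumN_succ (n : Nat) (g : Nat → Int) : sumN (n+1) g = sumN n g + g n := by
  simp [sumN, List.range_succ]

theorem norm_eq (v : Int) : normalize_mod v = v % pvMOD := by
  unfold normalize_mod
  rw [PySem.Int.mod_eq_emod_of_pos (by norm_num [pvMOD]),
      PySem.Int.mod_eq_emod_of_pos (by norm_num [pvMOD]),
      Int.add_emod_right, Int.emod_emod_of_dvd _ dvd_rfl]

theorem foldl_norm (f : Int → Int) : ∀ (l : List Int) (x : Int),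
    l.foldl (fun acc j => normalize_mod (acc + f j)) (x % pvMOD) = (x + (l.map f).sum) % pvMOD := by
  intro l
  induction l with
  | nil => intro x; simp
  | cons j l ih =>
    intro x
    have h1 : normalize_mod (x % pvMOD + f j) = (x + f j) % pvMOD := by
      rw [norm_eq, Int.emod_add_emod]
    simp only [List.foldl_cons, List.map_cons, List.sum_cons]
    rw [h1, ← add_assoc]
    exact ih (x + f j)

theorem foldl_sub (g : Int → Int) : ∀ (l : List Int) (a : Int),
    l.foldl (fun acc x => acc - g x) a = a - (l.map g).sum := by
  intro l
  induction l with
  | nil => intro a; simp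
  | cons x l ih => intro a; simp only [List.foldl_cons, List.map_cons, List.sum_cons, ih]; ring

theorem setfold (v : Nat → Int) (n : Nat) : ∀ (j : Nat), j ≤ n →
    (List.range j).foldl (fun r m => r.set m (v m)) (List.replicate n (0:Int))
      = (List.range j).map v ++ List.replicate (n - j) 0 := by
  intro j
  induction j with
  | zero => intro _; simp
  | succ j ih =>
    intro hj
    rw [List.range_succ, List.foldl_append, ih (by omega)]
    simp only [List.foldl_cons, List.foldl_nil, List.set_append, List.length_map,
      List.length_range, lt_irrefl, Nat.sub_self]
    have hrep : List.replicate (n - j) (0:Int) = 0 :: List.replicate (n - (j+1)) 0 := by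
      have : n - j = (n - (j+1)) + 1 := by omega
      rw [this, List.replicate_succ]
    rw [hrep]
    simp

theorem sumN_modeq (M : Int) (g h : Nat → Int) : ∀ (n : Nat), (∀ a, a < n → g a ≡ h a [ZMOD M]) →
    sumN n g ≡ sumN n h [ZMOD M] := by
  intro n
  induction n with
  | zero => intro _; simp [sumN]
  | succ n ih =>
    intro hp
    rw [sumN_succ, sumN_succ]
    exact Int.ModEq.add (ih (fun a ha => hp a (by omega))) (hp n (by omega))

theorem sumN_neg (n : Nat) (g : Nat → Int) : sumN n (fun a => -(g a)) = -(sumN n g) := by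
  induction n with
  | zero => simp [sumN]
  | succ n ih => rw [sumN_succ, sumN_succ, ih]; ring

theorem sumN_evenodd (h : Nat → Int) : ∀ (n : Nat),
    sumN (2*n+1) h = sumN (n+1) (fun a => h (2*a)) + sumN n (fun a => h (2*a+1)) := by
  intro n
  induction n with
  | zero => simp [sumN, List.range_succ]
  | succ n ih =>
    have e1 : 2*(n+1)+1 = (2*n+1) + 1 + 1 := by omega
    rw [e1, sumN_succ, sumN_succ, ih,
        show 2*n+1+1 = 2*(n+1) from by omega,
        sumN_succ (n+1) (fun a => h (2*a)), sumN_succ n (fun a => h (2*a+1))]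
    ring

theorem win_sum (f : Int → Int) (lo hi n : Int) (h0 : 0 ≤ lo) (hn : hi ≤ n)
    (hz : ∀ a, 0 ≤ a → a < n → (a < lo ∨ hi ≤ a) → f a = 0) :
    ((PySem.List.pyRange lo hi 1).map f).sum = ((PySem.List.pyRange 0 n 1).map f).sum := by
  by_cases hlh : hi ≤ lo
  · rw [PySem.List.pyRange_one_eq_nil hlh]
    symm
    apply List.sum_eq_zero
    intro x hx
    obtain ⟨a, ha, rfl⟩ := List.mem_map.mp hx
    rw [PySem.List.mem_pyRange_one] at ha
    exact hz a ha.1 ha.2 (by omega)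
  · push_neg at hlh
    rw [PySem.List.pyRange_one_append 0 lo n (by omega) (by omega),
        PySem.List.pyRange_one_append lo hi n (by omega) (by omega)]
    simp only [List.map_append, List.sum_append]
    have z1 : ((PySem.List.pyRange 0 lo 1).map f).sum = 0 := by
      apply List.sum_eq_zero
      intro x hx
      obtain ⟨a, ha, rfl⟩ := List.mem_map.mp hx
      rw [PySem.List.mem_pyRange_one] at ha
      exact hz a ha.1 (by omega) (by omega)
    have z2 : ((PySem.List.pyRange hi n 1).map f).sum = 0 := by
      apply List.sum_eq_zero
      intro x hx
      obtain ⟨a, ha, rfl⟩ := List.mem_map.mp hx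
      rw [PySem.List.mem_pyRange_one] at ha
      exact hz a (by omega) ha.2 (by omega)
    rw [z1, z2]
    ring
theorem sum_pyRange_eq_sumN (f : Int → Int) (n : Nat) :
    ((PySem.List.pyRange 0 (n:Int) 1).map f).sum = sumN n (fun a => f (a:Int)) := by
  rw [PySem.List.pyRange_one, List.map_map]
  have h0 : ((n:Int) - 0).toNat = n := by omega
  rw [h0]
  simp [sumN, Function.comp_def]

theorem qv_eq (q : List Int) (K : Nat) (h : K < q.length) (x : Int) (hx : 0 ≤ x) :
    PySem.List.pyGetD (List.take (K+1) q) x 0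
      = if x ≤ (K:Int) then PySem.List.pyGetD q x 0 else 0 := by
  obtain ⟨n, rfl⟩ := Int.eq_ofNat_of_zero_le hx
  rw [PySem.List.pyGetD_natCast, PySem.List.pyGetD_natCast,
      List.getD_eq_getElem?_getD, List.getD_eq_getElem?_getD, List.getElem?_take]
  by_cases hn : n ≤ K
  · rw [if_pos (show n < K+1 by omega), if_pos (show (n:Int) ≤ (K:Int) by exact_mod_cast hn)]
  · rw [if_neg (show ¬ n < K+1 by omega), if_neg (show ¬ (n:Int) ≤ (K:Int) by exact_mod_cast hn)]
    simp

theorem negq_at (q : List Int) (K : Nat) (h : K < q.length) (l : Nat) (hl : l ≤ K) :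
    PySem.List.pyGetD ((PySem.List.pyRange 0 (q.length:Int) 1).map (fun i =>
        normalize_mod (if PySem.Int.mod i 2 = 0 then PySem.List.pyGetD q i 0
                       else -(PySem.List.pyGetD q i 0)))) (l:Int) 0
      = (if l % 2 = 0 then PySem.List.pyGetD q (l:Int) 0 else -(PySem.List.pyGetD q (l:Int) 0)) % pvMOD := by
  rw [PySem.List.pyGetD_map_pyRange_of_nonneg _ _ _ _ (by omega) (by exact_mod_cast by omega : (l:Int) < (q.length:Int))]
  rw [norm_eq]
  congr 1
  have hm : PySem.Int.mod (l:Int) 2 = ((l % 2 : Nat) : Int) := by exact_mod_cast PySem.Int.mod_natCast l 2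
  rw [hm]
  by_cases hp : l % 2 = 0
  · rw [if_pos (by exact_mod_cast hp), if_pos hp]
  · rw [if_neg (by exact_mod_cast hp), if_neg hp]
theorem yM_modeq (y : Int) : y % pvMOD ≡ y [ZMOD pvMOD] := Int.emod_emod_of_dvd y dvd_rfl

theorem entry_eq (q : List Int) (K m : Nat) (hlen : K < q.length) (hm : m ≤ K) :
    (sumN (2*m+1) (fun j =>
        (if (j:Int) ≤ (K:Int) then PySem.List.pyGetD q (j:Int) 0 else 0) *
        (if 2*(m:Int) - (j:Int) ≤ (K:Int) then
           PySem.List.pyGetD ((PySem.List.pyRange 0 (q.length:Int) 1).map (fun i =>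
             normalize_mod (if PySem.Int.mod i 2 = 0 then PySem.List.pyGetD q i 0
                            else -(PySem.List.pyGetD q i 0)))) (2*(m:Int) - (j:Int)) 0
         else 0))) % pvMOD
    = (sumN (m+1) (fun a => PySem.List.pyGetD (List.take (K+1) q) (2*(a:Int)) 0 *
          PySem.List.pyGetD (List.take (K+1) q) (2*((m:Int)-(a:Int))) 0)
       - sumN m (fun a => PySem.List.pyGetD (List.take (K+1) q) (2*(a:Int)+1) 0 *
          PySem.List.pyGetD (List.take (K+1) q) (2*((m:Int)-1-(a:Int))+1) 0)) % pvMOD := by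
  rw [sumN_evenodd]
  have h1 : sumN (m+1) (fun a =>
      (if ((2*a:Nat):Int) ≤ (K:Int) then PySem.List.pyGetD q ((2*a:Nat):Int) 0 else 0) *
      (if 2*(m:Int) - ((2*a:Nat):Int) ≤ (K:Int) then
         PySem.List.pyGetD ((PySem.List.pyRange 0 (q.length:Int) 1).map (fun i =>
           normalize_mod (if PySem.Int.mod i 2 = 0 then PySem.List.pyGetD q i 0
                          else -(PySem.List.pyGetD q i 0)))) (2*(m:Int) - ((2*a:Nat):Int)) 0
       else 0))
      ≡ sumN (m+1) (fun a => PySem.List.pyGetD (List.take (K+1) q) (2*(a:Int)) 0 *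
          PySem.List.pyGetD (List.take (K+1) q) (2*((m:Int)-(a:Int))) 0) [ZMOD pvMOD] := by
    apply sumN_modeq
    intro a ha
    have e : 2*(m:Int) - ((2*a:Nat):Int) = ((2*(m-a):Nat):Int) := by push_cast; omega
    have e2 : 2*((m:Int)-(a:Int)) = ((2*(m-a):Nat):Int) := by push_cast; omega
    have e3 : 2*((a:Nat):Int) = ((2*a:Nat):Int) := by push_cast; ring
    rw [e, e2, e3, qv_eq q K hlen _ (by positivity), qv_eq q K hlen _ (by positivity)]
    by_cases hc : 2*(m-a) ≤ K
    · rw [negq_at q K hlen _ hc, if_pos (show 2*(m-a) % 2 = 0 by omega),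
          if_pos (show ((2*(m-a):Nat):Int) ≤ (K:Int) by exact_mod_cast hc),
          if_pos (show ((2*(m-a):Nat):Int) ≤ (K:Int) by exact_mod_cast hc)]
      exact Int.ModEq.mul_left _ (yM_modeq _)
    · have hcc : ¬ 2*(((m-a):Nat):Int) ≤ (K:Int) := by exact_mod_cast hc
      simp [hcc]
  have h2 : sumN m (fun a =>
      (if ((2*a+1:Nat):Int) ≤ (K:Int) then PySem.List.pyGetD q ((2*a+1:Nat):Int) 0 else 0) *
      (if 2*(m:Int) - ((2*a+1:Nat):Int) ≤ (K:Int) then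
         PySem.List.pyGetD ((PySem.List.pyRange 0 (q.length:Int) 1).map (fun i =>
           normalize_mod (if PySem.Int.mod i 2 = 0 then PySem.List.pyGetD q i 0
                          else -(PySem.List.pyGetD q i 0)))) (2*(m:Int) - ((2*a+1:Nat):Int)) 0
       else 0))
      ≡ sumN m (fun a => -(PySem.List.pyGetD (List.take (K+1) q) (2*(a:Int)+1) 0 *
          PySem.List.pyGetD (List.take (K+1) q) (2*((m:Int)-1-(a:Int))+1) 0)) [ZMOD pvMOD] := by
    apply sumN_modeq
    intro a ha
    have e : 2*(m:Int) - ((2*a+1:Nat):Int) = ((2*(m-1-a)+1:Nat):Int) := by push_cast; omega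
    have e2 : 2*((m:Int)-1-(a:Int))+1 = ((2*(m-1-a)+1:Nat):Int) := by push_cast; omega
    have e3 : 2*((a:Nat):Int)+1 = ((2*a+1:Nat):Int) := by push_cast; ring
    rw [e, e2, e3, qv_eq q K hlen _ (by positivity), qv_eq q K hlen _ (by positivity)]
    by_cases hc : 2*(m-1-a)+1 ≤ K
    · rw [negq_at q K hlen _ hc, if_neg (show ¬ (2*(m-1-a)+1) % 2 = 0 by omega),
          if_pos (show ((2*(m-1-a)+1:Nat):Int) ≤ (K:Int) by exact_mod_cast hc),
          if_pos (show ((2*(m-1-a)+1:Nat):Int) ≤ (K:Int) by exact_mod_cast hc)]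
      have : -(((if ((2*a+1:Nat):Int) ≤ (K:Int) then PySem.List.pyGetD q ((2*a+1:Nat):Int) 0 else 0)) *
          PySem.List.pyGetD q ((2*(m-1-a)+1:Nat):Int) 0)
          = ((if ((2*a+1:Nat):Int) ≤ (K:Int) then PySem.List.pyGetD q ((2*a+1:Nat):Int) 0 else 0)) *
            (-(PySem.List.pyGetD q ((2*(m-1-a)+1:Nat):Int) 0)) := by ring
      rw [this]
      exact Int.ModEq.mul_left _ (yM_modeq _)
    · have hcc : ¬ 2*(((m-1-a):Nat):Int)+1 ≤ (K:Int) := by exact_mod_cast hc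
      simp [hcc]
  have hc := Int.ModEq.add h1 h2
  rw [sumN_neg] at hc
  rw [← sub_eq_add_neg] at hc
  exact hc
theorem foldl_norm0 (f : Int → Int) (l : List Int) :
    l.foldl (fun acc j => normalize_mod (acc + f j)) 0 = (l.map f).sum % pvMOD := by
  have h := foldl_norm f l 0
  rw [Int.zero_emod, zero_add] at h
  exact h

theorem getD_take_zero (q : List Int) (K : Nat) (hlen : K < q.length) (x : Int)
    (hx : 0 ≤ x) (hb : ((K:Int)+1) ≤ x) :
    PySem.List.pyGetD (List.take (K+1) q) x 0 = 0 := by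
  rw [qv_eq q K hlen x hx, if_neg (by omega)]

theorem main_eq (q : List Int) (k : Int) (hpre : k < 0 ∨ k + 1 ≤ (q.length:Int)) :
    multiply_and_reduce_polynomials q k = multiply_and_reduce_polynomials_alt q k := by
  by_cases hneg : k < 0
  · simp only [multiply_and_reduce_polynomials, multiply_and_reduce_polynomials_alt]
    rw [PySem.List.pyRange_of_pos 0 (2*k+1) (by norm_num),
        if_neg (show ¬ (0:Int) ≤ k by omega),
        PySem.List.pyRange_one_eq_nil (show k+1 ≤ 0 by omega)]
    simp only [if_neg (show ¬ (0:Int) < 2*k+1 by omega), List.range_zero, List.map_nil,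
      List.foldl_nil, show (k+1).toNat = 0 by omega, List.replicate_zero]
  · obtain ⟨K, rfl⟩ := Int.eq_ofNat_of_zero_le (by omega : (0:Int) ≤ k)
    have hlen : K < q.length := by rcases hpre with h | h <;> omega
    -- A side
    simp only [multiply_and_reduce_polynomials]
    rw [PySem.List.pyRange_of_pos 0 (2*(K:Int)+1) (by norm_num)]
    rw [show (if (0:Int) < 2*(K:Int)+1 then ((2*(K:Int)+1-0+2-1)/2).toNat else 0) = K+1 by
          rw [if_pos (by omega)]; omega]
    rw [List.foldl_map]
    simp only [zero_add]
    have hfd : ∀ (m : Nat), PySem.Int.floordiv (2*(m:Int)) 2 = ((m:Nat):Int) := by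
      intro m
      rw [PySem.Int.floordiv_eq_ediv_of_pos (by norm_num)]
      omega
    simp only [hfd, PySem.List.pySetD_natCast]
    rw [show (((K:Int)+1)).toNat = K+1 by omega]
    rw [setfold _ (K+1) (K+1) le_rfl]
    simp only [Nat.sub_self, List.replicate_zero, List.append_nil]
    -- B side
    simp only [multiply_and_reduce_polynomials_alt]
    rw [if_pos (by omega : (0:Int) ≤ (K:Int))]
    rw [PySem.List.slice_to q (show (0:Int) ≤ (K:Int)+1 by omega)]
    rw [show ((K:Int)+1).toNat = K+1 by omega]
    rw [show ((List.take (K+1) q).length : Int) = ((K+1:Nat):Int) by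
          rw [List.length_take]; congr 1; omega]
    rw [show (((K+1:Nat):Int)+1) = ((K+2:Nat):Int) by push_cast; ring]
    rw [show PySem.Int.floordiv (((K+2:Nat)):Int) 2 = (((K+2)/2 : Nat):Int) from by
          exact_mod_cast PySem.Int.floordiv_natCast (K+2) 2,
        show PySem.Int.floordiv (((K+1:Nat)):Int) 2 = (((K+1)/2 : Nat):Int) from by
          exact_mod_cast PySem.Int.floordiv_natCast (K+1) 2]
    rw [PySem.List.pyRange_one 0 ((K:Int)+1)]
    rw [show (((K:Int)+1) - 0).toNat = K+1 by omega]
    rw [List.foldl_map]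
    simp only [zero_add]
    rw [PySem.List.foldl_append_singleton_eq_map]
    rw [List.nil_append]
    apply List.map_congr_left
    intro m hm
    rw [List.mem_range] at hm
    rw [foldl_norm0]
    rw [PySem.Int.mod_eq_emod_of_pos (show (0:Int) < pvMOD by norm_num [pvMOD])]
    rw [PySem.List.foldl_add, foldl_sub, zero_add]
    rw [win_sum _ _ _ ((m:Int)+1) (le_max_left _ _) (min_le_left _ _) ?hz1]
    case hz1 =>
      intro a h0 h1 hout
      rcases hout with hlt | hge
      · have hne : ((K:Int)+1) ≤ 2*((m:Int)-a) := by
          have hdiv : K+1 ≤ 2*((K+2)/2) := by omega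
          omega
        rw [getD_take_zero q K hlen _ (by omega) hne, mul_zero]
      · have hne : ((K:Int)+1) ≤ 2*a := by
          have hdiv : K+1 ≤ 2*((K+2)/2) := by omega
          omega
        rw [getD_take_zero q K hlen _ (by omega) hne, zero_mul]
    rw [win_sum _ _ _ ((m:Int)) (le_max_left _ _) (min_le_left _ _) ?hz2]
    case hz2 =>
      intro a h0 h1 hout
      rcases hout with hlt | hge
      · have hne : ((K:Int)+1) ≤ 2*((m:Int)-1-a)+1 := by
          have hdiv : K ≤ 2*((K+1)/2) := by omega
          omega
        rw [getD_take_zero q K hlen _ (by omega) hne, mul_zero]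
      · have hne : ((K:Int)+1) ≤ 2*a+1 := by
          have hdiv : K ≤ 2*((K+1)/2) := by omega
          omega
        rw [getD_take_zero q K hlen _ (by omega) hne, zero_mul]
    rw [show 2*(m:Int)+1 = ((2*m+1:Nat):Int) by push_cast; ring,
        show (m:Int)+1 = ((m+1:Nat):Int) by push_cast; ring]
    rw [sum_pyRange_eq_sumN, sum_pyRange_eq_sumN, sum_pyRange_eq_sumN]
    exact entry_eq q K m hlen (by omega)

-- ===== VERDICT (by name: the statement is the Claim_ definition above) =====
theorem multiply_and_reduce_polynomials_spec : Claim_equal_multiply_and_reduce_polynomials := by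
  intro polynomial_q degree_k _ hpre
  unfold Pre_multiply_and_reduce_polynomials at hpre
  unfold Spec_multiply_and_reduce_polynomials
  exact main_eq polynomial_q degree_k hpre
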